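-- pv_equiv track=rewrite | github.com/gPdbs2/Algorithm-Study | BOJ/Python/S2/S2 3085 사탕 게임.py | check
-- ===== SOURCE A (Python) =====
-- def check(arr):
--     n = len(arr)
--     ans = 1
--
--     for i in range(n):
--         # 열 순회하며 연속된 숫자 세기
--         cnt = 1
--         for j in range(1, n):
--             # 이전 것과 같으면 cnt에 1 추가
--             if arr[i][j] == arr[i][j-1]:
--                 cnt += 1
--             # 이전과 다르면 다시 1로 초기화
--             else:
--                 cnt = 1
--             # 비교 후 현재 cnt가 더 크면 ans 갱신
--             if cnt > ans:
--                 ans = cnt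
--
--         # 행 순회하며 연속된 숫자 세기
--         cnt = 1
--         for j in range(1, n):
--             if arr[j][i] == arr[j-1][i]:
--                 cnt += 1
--             else:
--                 cnt = 1
--             if cnt > ans:
--                 ans = cnt
--
--     return ans
-- ===== SOURCE B (Python) =====
-- def check(arr):
--     n = len(arr)
--     lines = [row[:n] for row in arr]
--     lines += [[arr[r][c] for r in range(n)] for c in range(n)]
--     best = 1
--     for line in lines:
--         while line:
--             k = 1
--             while k < len(line) and line[k] == line[0]:
--                 k += 1
--             if k > best:
--                 best = k
--             line = line[k:]
--     return best
-- ===== Notes on version B (the rewrite author's own statement) =====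
-- stated objective: simpler
-- what changed: B collects all row/column lines of the n-by-n square explicitly and measures each maximal equal run by skipping whole runs (two-pointer), instead of A's interleaved per-index counter-with-reset scan carrying (cnt, ans).
-- outside the precondition, e.g. on check([[]]): A returns 1, B raises IndexError
import Mathlib
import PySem

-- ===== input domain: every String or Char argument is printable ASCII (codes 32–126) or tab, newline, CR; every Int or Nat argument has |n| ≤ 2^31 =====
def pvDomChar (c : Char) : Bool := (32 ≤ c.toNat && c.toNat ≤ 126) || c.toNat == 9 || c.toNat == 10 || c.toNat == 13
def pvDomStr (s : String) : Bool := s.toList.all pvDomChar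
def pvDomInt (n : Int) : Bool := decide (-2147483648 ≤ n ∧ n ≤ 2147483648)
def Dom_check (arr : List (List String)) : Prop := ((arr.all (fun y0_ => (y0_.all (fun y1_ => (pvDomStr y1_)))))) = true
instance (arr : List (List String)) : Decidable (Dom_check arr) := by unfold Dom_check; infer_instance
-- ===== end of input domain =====

-- B collects the row/column lines of the n×n square explicitly and measures runs by skipping
-- whole runs, instead of A's interleaved per-index counter-with-reset scan (objective: simpler).

-- ===== PORT A =====
def check (arr : List (List String)) : Int :=
  let n : Int := (arr.length : Int)
  (PySem.List.pyRange 0 n 1).foldl (fun ans i =>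
    let p1 := (PySem.List.pyRange 1 n 1).foldl (fun (p : Int × Int) j =>
      let cnt : Int := if PySem.List.pyGetD (PySem.List.pyGetD arr i []) j "" ==
                          PySem.List.pyGetD (PySem.List.pyGetD arr i []) (j-1) "" then p.1 + 1 else 1
      (cnt, if cnt > p.2 then cnt else p.2)) (1, ans)
    let p2 := (PySem.List.pyRange 1 n 1).foldl (fun (p : Int × Int) j =>
      let cnt : Int := if PySem.List.pyGetD (PySem.List.pyGetD arr j []) i "" ==
                          PySem.List.pyGetD (PySem.List.pyGetD arr (j-1) []) i "" then p.1 + 1 else 1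
      (cnt, if cnt > p.2 then cnt else p.2)) (1, p1.2)
    p2.2) 1

-- ===== PORT B =====
-- the inner pair of while loops of Source B: skip the leading run, record its length, continue
def runsFold : List String → Int → Int
  | [], best => best
  | x :: xs, best =>
      let w := (xs.takeWhile (fun y => y == x)).length
      let k : Int := 1 + (w : Int)
      runsFold (xs.drop w) (if k > best then k else best)
termination_by l _ => l.length
decreasing_by simp only [List.length_drop, List.length_cons]; omega

def check_alt (arr : List (List String)) : Int :=
  let n : Int := (arr.length : Int)
  let lines := arr.map (fun row => PySem.List.slice row none (some n)) ++
    (PySem.List.pyRange 0 n 1).map (fun c =>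
      (PySem.List.pyRange 0 n 1).map (fun r => PySem.List.pyGetD (PySem.List.pyGetD arr r []) c ""))
  lines.foldl (fun best line => runsFold line best) 1

-- ===== PRECONDITION & SPEC =====
-- Pre_check excludes the jagged grids with a row shorter than n = len(arr): A raises IndexError on them,
-- except the one-row grid whose single row is empty: there A's loops are empty and it returns 1,
-- while B probes the column and raises (see the cite in claim.json).
def Pre_check (arr : List (List String)) : Prop :=
  (arr.all (fun row => decide (arr.length ≤ row.length))) = true
instance (arr : List (List String)) : Decidable (Pre_check arr) := by unfold Pre_check; infer_instance
def pvWitness_check : List (List String) := [["a", "b"], ["b", "b"]]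

def Spec_check (arr : List (List String)) (out : Int) : Prop := out = check_alt arr
instance (arr : List (List String)) (out : Int) : Decidable (Spec_check arr out) := by unfold Spec_check; infer_instance

-- ===== CLAIM (what is proved, stated in full; the proofs are below) =====
def Claim_equal_check : Prop := ∀ (arr : List (List String)), Dom_check arr → Pre_check arr → Spec_check arr (check arr)

-- ===== LEMMAS AND PROOFS =====

-- max run length of consecutive equal elements (0 for [])
def maxRun : List String → Int
  | [] => 0
  | x :: xs =>
      let w := (xs.takeWhile (fun y => y == x)).length
      max (1 + (w : Int)) (maxRun (xs.drop w))
termination_by l => l.length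
decreasing_by simp only [List.length_drop, List.length_cons]; omega

-- A's inner loop, rephrased over the list of elements (prev = previous element)
def aLoop (prev : String) : List String → Int → Int → Int
  | [], _, ans => ans
  | y :: ys, cnt, ans =>
      let c : Int := if y == prev then cnt + 1 else 1
      aLoop y ys c (if c > ans then c else ans)

def stepF (v : Int → String) (p : Int × Int) (j : Int) : Int × Int :=
  let c : Int := if v j == v (j-1) then p.1 + 1 else 1
  (c, if c > p.2 then c else p.2)

theorem ifmax (c x : Int) : (if c > x then c else x) = max x c := by split <;> omega

theorem runsFold_nil (b : Int) : runsFold [] b = b := by rw [runsFold.eq_def]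

theorem runsFold_cons (x : String) (xs : List String) (b : Int) :
    runsFold (x :: xs) b = runsFold (xs.drop (xs.takeWhile (fun y => y == x)).length)
      (if 1 + ((xs.takeWhile (fun y => y == x)).length : Int) > b
       then 1 + ((xs.takeWhile (fun y => y == x)).length : Int) else b) := by
  rw [runsFold.eq_def]

theorem aLoop_nil (prev : String) (cnt ans : Int) : aLoop prev [] cnt ans = ans := rfl

theorem aLoop_cons (prev y : String) (ys : List String) (cnt ans : Int) :
    aLoop prev (y :: ys) cnt ans = aLoop y ys (if y == prev then cnt + 1 else 1)
      (if (if y == prev then cnt + 1 else 1) > ans then (if y == prev then cnt + 1 else 1) else ans) := rfl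

theorem maxRun_nil : maxRun [] = 0 := by rw [maxRun.eq_def]

theorem maxRun_cons (x : String) (xs : List String) :
    maxRun (x :: xs) = max (1 + ((xs.takeWhile (fun y => y == x)).length : Int))
      (maxRun (xs.drop (xs.takeWhile (fun y => y == x)).length)) := by
  rw [maxRun.eq_def]

theorem runsFold_eq (m : Nat) : ∀ (l : List String), l.length = m → ∀ (b : Int), 0 ≤ b →
    runsFold l b = max b (maxRun l) := by
  induction m using Nat.strong_induction_on with
  | _ m ih =>
    intro l hl b hb
    match l with
    | [] => rw [runsFold_nil, maxRun_nil]; try omega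
    | x :: xs =>
      rw [runsFold_cons, maxRun_cons]
      have hlt : (xs.drop (xs.takeWhile (fun y => y == x)).length).length < m := by
        subst hl; simp only [List.length_drop, List.length_cons]; omega
      rw [ih _ hlt _ rfl _ (by omega)]
      omega

theorem aLoop_max (xs : List String) : ∀ (prev : String) (cnt a b : Int),
    aLoop prev xs cnt (max a b) = max a (aLoop prev xs cnt b) := by
  induction xs with
  | nil => intro prev cnt a b; rw [aLoop_nil, aLoop_nil]
  | cons y ys ih =>
    intro prev cnt a b
    rw [aLoop_cons, aLoop_cons]
    have h : ∀ c : Int, (if c > max a b then c else max a b) = max a (if c > b then c else b) := by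
      intro c; rw [ifmax, ifmax]; omega
    simp only [h]
    exact ih y _ a _

theorem aLoop_core (xs : List String) : ∀ (prev : String) (cnt : Int), 1 ≤ cnt →
    aLoop prev xs cnt cnt = max (cnt + ((xs.takeWhile (fun y => y == prev)).length : Int))
      (maxRun (xs.drop (xs.takeWhile (fun y => y == prev)).length)) := by
  induction xs with
  | nil => intro prev cnt h; rw [aLoop_nil]; simp [maxRun_nil]; omega
  | cons y ys ih =>
    intro prev cnt h
    rw [aLoop_cons]
    by_cases hy : (y == prev) = true
    · have hyy : y = prev := eq_of_beq hy
      have hc : (if y == prev then cnt + 1 else 1) = cnt + 1 := by simp [hy]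
      rw [hc]
      have h1 : (if cnt + 1 > cnt then cnt + 1 else cnt) = cnt + 1 := by split <;> omega
      rw [h1, ih y (cnt + 1) (by omega)]
      subst hyy
      simp only [List.takeWhile_cons, hy, if_true, List.length_cons, List.drop_succ_cons]
      push_cast
      omega
    · have hc : (if y == prev then cnt + 1 else 1) = 1 := by simp [hy]
      rw [hc]
      have h1 : (if (1 : Int) > cnt then 1 else cnt) = cnt := by split <;> omega
      rw [h1]
      have hmc : cnt = max cnt 1 := by omega
      rw [hmc, aLoop_max, ih y 1 le_rfl]
      simp only [List.takeWhile_cons, hy, Bool.false_eq_true, if_false, List.length_nil,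
        List.drop_zero, Nat.cast_zero]
      rw [maxRun_cons]
      omega

theorem aLoop_eq (x : String) (xs : List String) (ans : Int) (h : 1 ≤ ans) :
    aLoop x xs 1 ans = max ans (maxRun (x :: xs)) := by
  have h2 := aLoop_max xs x 1 ans 1
  rw [max_eq_left h] at h2
  rw [h2, aLoop_core xs x 1 le_rfl, maxRun_cons]

theorem idx (v : Int → String) (k : Nat) : ∀ (a cnt ans : Int),
    ((PySem.List.pyRange a (a + (k : Int)) 1).foldl (stepF v) (cnt, ans)).2
      = aLoop (v (a - 1)) ((PySem.List.pyRange a (a + (k : Int)) 1).map v) cnt ans := by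
  induction k with
  | zero =>
    intro a cnt ans
    rw [PySem.List.pyRange_one_eq_nil (by omega)]
    simp only [List.foldl_nil, List.map_nil]
    rw [aLoop_nil]
  | succ k ih =>
    intro a cnt ans
    have hb : a + ((k + 1 : Nat) : Int) = (a + 1) + (k : Int) := by push_cast; ring
    rw [hb, PySem.List.pyRange_one_cons (by omega)]
    simp only [List.foldl_cons, List.map_cons]
    rw [aLoop_cons]
    have hstep : stepF v (cnt, ans) a =
        (if v a == v (a - 1) then cnt + 1 else 1,
         if (if v a == v (a - 1) then cnt + 1 else 1) > ans
         then (if v a == v (a - 1) then cnt + 1 else 1) else ans) := rfl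
    rw [hstep, ih (a + 1)]
    simp only [add_sub_cancel_right]

theorem inner_eq (v : Int → String) (n : Nat) (hn : 1 ≤ n) (ans : Int) (h : 1 ≤ ans) :
    ((PySem.List.pyRange 1 (n : Int) 1).foldl (stepF v) (1, ans)).2
      = max ans (maxRun ((PySem.List.pyRange 0 (n : Int) 1).map v)) := by
  have hb : (n : Int) = 1 + ((n - 1 : Nat) : Int) := by omega
  rw [hb, idx v (n - 1) 1 1 ans]
  norm_num
  rw [aLoop_eq _ _ ans h]
  congr 1
  rw [PySem.List.pyRange_one_cons (by omega : (0 : Int) < 1 + ((n - 1 : Nat) : Int))]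
  simp

-- the running max over f 0 … f (m-1), seeded at 0
def supR (f : Int → Int) (m : Nat) : Int :=
  (PySem.List.pyRange 0 (m : Int) 1).foldl (fun b i => max b (f i)) 0

theorem supR_zero (f : Int → Int) : supR f 0 = 0 := by
  unfold supR
  rw [PySem.List.pyRange_one_eq_nil (by omega)]
  rfl

theorem supR_succ (f : Int → Int) (m : Nat) : supR f (m + 1) = max (supR f m) (f m) := by
  unfold supR
  have hb : ((m + 1 : Nat) : Int) = (m : Int) + 1 := by push_cast; ring
  rw [hb, PySem.List.pyRange_one_succ_right (by omega)]
  simp [List.foldl_append]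

theorem foldl_g (g : Int → Int → Int) (v : Int → Int) :
    ∀ (m : Nat), (∀ a i, 1 ≤ a → 0 ≤ i → i < (m : Int) → g a i = max a (v i)) →
    ∀ a, 1 ≤ a → (PySem.List.pyRange 0 (m : Int) 1).foldl g a = max a (supR v m) := by
  intro m
  induction m with
  | zero =>
    intro _ a ha
    rw [PySem.List.pyRange_one_eq_nil (by omega), supR_zero]
    simp; omega
  | succ m ih =>
    intro hg a ha
    have hb : ((m + 1 : Nat) : Int) = (m : Int) + 1 := by push_cast; ring
    rw [hb, PySem.List.pyRange_one_succ_right (by omega), List.foldl_append]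
    simp only [List.foldl_cons, List.foldl_nil]
    rw [ih (fun a i h1 h2 h3 => hg a i h1 h2 (by omega)) a ha]
    rw [hg _ m (by omega) (by omega) (by omega), supR_succ]
    omega

def vrow (arr : List (List String)) (i j : Int) : String :=
  PySem.List.pyGetD (PySem.List.pyGetD arr i []) j ""
def vcol (arr : List (List String)) (i j : Int) : String :=
  PySem.List.pyGetD (PySem.List.pyGetD arr j []) i ""

def rv (arr : List (List String)) (i : Int) : Int :=
  maxRun ((PySem.List.pyRange 0 (arr.length : Int) 1).map (vrow arr i))
def cv (arr : List (List String)) (i : Int) : Int :=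
  maxRun ((PySem.List.pyRange 0 (arr.length : Int) 1).map (vcol arr i))

def ABody (arr : List (List String)) (ans i : Int) : Int :=
  ((PySem.List.pyRange 1 (arr.length : Int) 1).foldl (stepF (vcol arr i))
    (1, ((PySem.List.pyRange 1 (arr.length : Int) 1).foldl (stepF (vrow arr i)) (1, ans)).2)).2

theorem check_eq (arr : List (List String)) :
    check arr = (PySem.List.pyRange 0 (arr.length : Int) 1).foldl (ABody arr) 1 := rfl

theorem ABody_eq (arr : List (List String)) (hn : 1 ≤ arr.length) (a i : Int) (ha : 1 ≤ a) :
    ABody arr a i = max a (max (rv arr i) (cv arr i)) := by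
  unfold ABody
  rw [inner_eq (vrow arr i) arr.length hn a ha]
  rw [inner_eq (vcol arr i) arr.length hn _ (by omega)]
  unfold rv cv
  omega

theorem checkA (arr : List (List String)) :
    check arr = max 1 (max (supR (rv arr) arr.length) (supR (cv arr) arr.length)) := by
  rw [check_eq]
  rcases Nat.eq_zero_or_pos arr.length with h0 | h1
  · rw [h0]
    rw [PySem.List.pyRange_one_eq_nil (by omega), supR_zero, supR_zero]
    simp only [List.foldl_nil]
    omega
  · rw [foldl_g (ABody arr) (fun i => max (rv arr i) (cv arr i)) arr.length
      (fun a i ha _ _ => ABody_eq arr h1 a i ha) 1 le_rfl]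
    have hsplit : ∀ m : Nat, supR (fun i => max (rv arr i) (cv arr i)) m
        = max (supR (rv arr) m) (supR (cv arr) m) := by
      intro m
      induction m with
      | zero => rw [supR_zero, supR_zero, supR_zero]; omega
      | succ m ih => rw [supR_succ, supR_succ, supR_succ, ih]; omega
    rw [hsplit]

def truncRow (n : Int) (row : List String) : List String := PySem.List.slice row none (some n)
def colLine (arr : List (List String)) (c : Int) : List String :=
  (PySem.List.pyRange 0 (arr.length : Int) 1).map (fun r =>
    PySem.List.pyGetD (PySem.List.pyGetD arr r []) c "")

theorem check_alt_eq (arr : List (List String)) :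
    check_alt arr = ((arr.map (truncRow (arr.length : Int)) ++
      (PySem.List.pyRange 0 (arr.length : Int) 1).map (colLine arr)).foldl
        (fun best line => runsFold line best) 1) := rfl

theorem line_eq (arr : List (List String)) (hpre : Pre_check arr) (i : Int)
    (h0 : 0 ≤ i) (hi : i < (arr.length : Int)) :
    truncRow (arr.length : Int) (PySem.List.pyGetD arr i []) =
      (PySem.List.pyRange 0 (arr.length : Int) 1).map (vrow arr i) := by
  have hrow : arr.length ≤ (PySem.List.pyGetD arr i []).length := by
    have hm : PySem.List.pyGetD arr i [] ∈ arr := by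
      rw [PySem.List.pyGetD_eq_getElem arr [] h0 hi]
      exact List.getElem_mem _
    exact of_decide_eq_true (List.all_eq_true.mp hpre _ hm)
  unfold truncRow vrow
  rw [PySem.List.slice_to_natCast]
  apply List.ext_getElem
  · simp [PySem.List.length_pyRange_one]
    omega
  · intro k hk1 hk2
    have hkn : k < arr.length := by simp [List.length_take] at hk1; omega
    simp only [List.getElem_take, List.getElem_map, PySem.List.getElem_pyRange_one]
    have : (0 : Int) + (k : Int) = ((k : Nat) : Int) := by omega
    rw [this, PySem.List.pyGetD_natCast]
    rw [List.getD_eq_getElem _ _ (by omega)]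

theorem checkB (arr : List (List String)) (hpre : Pre_check arr) :
    check_alt arr = max 1 (max (supR (rv arr) arr.length) (supR (cv arr) arr.length)) := by
  rw [check_alt_eq, List.foldl_append, List.foldl_map, List.foldl_map]
  rw [← PySem.List.foldl_pyRange_zero_pyGetD' arr []
      (fun best row => runsFold (truncRow (arr.length : Int) row) best) 1]
  rw [foldl_g _ (rv arr) arr.length ?hr 1 le_rfl]
  case hr =>
    intro a i ha h0i hi
    rw [line_eq arr hpre i h0i hi]
    exact runsFold_eq _ _ rfl a (by omega)
  rw [foldl_g _ (cv arr) arr.length ?hc _ (by omega)]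
  case hc =>
    intro a i ha h0i hi
    exact runsFold_eq _ _ rfl a (by omega)
  omega

-- ===== VERDICT (by name: the statement is the Claim_ definition above) =====
theorem check_spec : Claim_equal_check := by
  intro arr _ hpre
  unfold Spec_check
  rw [checkA arr, checkB arr hpre]
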